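-- pv_equiv track=rewrite | github.com/tcollier/aoc_solver | 2020/06/main.py | part1_solution
-- ===== SOURCE A (Python) =====
-- def part1_solution(input):
--     group_answers = set()
--     total_answered = 0
--     for line in input:
--         if line == "":
--             total_answered += len(group_answers)
--             group_answers = set()
--             continue
--         for question in line:
--             group_answers.add(question)
--
--     return total_answered + len(group_answers)
-- ===== SOURCE B (Python) =====
-- def part1_solution(input):
--     groups = []
--     current = []
--     for line in input:
--         if line == "":
--             groups.append(current)
--             current = []
--         else:
--             current.append(line)
--     groups.append(current)
--     return sum(len(set("".join(g))) for g in groups)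
-- ===== Notes on version B (the rewrite author's own statement) =====
-- stated objective: simpler
-- what changed: B separates grouping from counting: one pass builds the list of groups (split on blank lines), then a comprehension sums len(set(''.join(g))) per group, instead of A's interleaved mutable set with flush-on-blank and leftover-state finish.
import Mathlib
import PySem

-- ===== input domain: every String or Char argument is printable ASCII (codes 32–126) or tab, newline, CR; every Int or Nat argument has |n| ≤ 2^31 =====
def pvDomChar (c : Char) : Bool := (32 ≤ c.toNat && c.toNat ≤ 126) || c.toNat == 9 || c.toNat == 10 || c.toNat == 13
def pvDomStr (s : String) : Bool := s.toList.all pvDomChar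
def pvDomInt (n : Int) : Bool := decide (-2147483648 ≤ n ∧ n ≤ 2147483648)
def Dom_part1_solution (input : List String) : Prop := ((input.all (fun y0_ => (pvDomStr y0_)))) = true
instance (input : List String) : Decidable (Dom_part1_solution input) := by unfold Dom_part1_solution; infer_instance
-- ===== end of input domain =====

-- B separates grouping (split the lines on "") from counting (sum of len(set("".join(g))) per group); same cost, plainer structure.


-- ===== PORT A =====
-- state = (group_answers, total_answered); the inner 'for question in line' is a foldl of Set.add over the line's chars
def part1_solution (input : List String) : Int :=
  let st := input.foldl
    (fun (st : PySem.Set Char × Int) line =>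
      if line == "" then (PySem.Set.empty, st.2 + PySem.Set.len st.1)
      else (line.toList.foldl PySem.Set.add st.1, st.2))
    (PySem.Set.empty, 0)
  st.2 + PySem.Set.len st.1

-- ===== PORT B =====
-- count of one group: len(set("".join(g)))
def pvGroupCount (g : List String) : Int :=
  PySem.Set.len (PySem.Set.ofList (PySem.Str.join "" g).toList)

-- the grouping loop: accumulator = (groups so far, current group)
def pvGroups (input : List String) : List (List String) × List String :=
  input.foldl
    (fun (acc : List (List String) × List String) line =>
      if line == "" then (acc.1 ++ [acc.2], [])
      else (acc.1, acc.2 ++ [line]))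
    ([], [])

def part1_solution_alt (input : List String) : Int :=
  let acc := pvGroups input
  ((acc.1 ++ [acc.2]).map pvGroupCount).sum

-- ===== PRECONDITION & SPEC =====
def Spec_part1_solution (input : List String) (out : Int) : Prop := out = part1_solution_alt input
instance (input : List String) (out : Int) : Decidable (Spec_part1_solution input out) := by unfold Spec_part1_solution; infer_instance

-- ===== CLAIM (what is proved, stated in full; the proofs are below) =====
def Claim_equal_part1_solution : Prop := ∀ (input : List String), Dom_part1_solution input → Spec_part1_solution input (part1_solution input)

-- ===== LEMMAS AND PROOFS =====

-- common specification: recursive split on blank lines, carrying the current group's answer set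
def pvSpecF : List String → PySem.Set Char → Int
  | [], s => PySem.Set.len s
  | line :: rest, s =>
      if line == "" then PySem.Set.len s + pvSpecF rest PySem.Set.empty
      else pvSpecF rest (PySem.Set.update s line.toList)

-- the flattened characters of a group
def pvChars (g : List String) : List Char := (g.map String.toList).flatten

lemma pvJoin_empty_sep (l : List (List Char)) : PySem.Chars.join [] l = l.flatten := by
  induction l with
  | nil => simp [PySem.Chars.join_nil]
  | cons p rest ih =>
    cases rest with
    | nil => simp [PySem.Chars.join_singleton]
    | cons q r => simp [PySem.Chars.join_cons_cons, ih]

lemma pvGroupCount_eq (g : List String) :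
    pvGroupCount g = PySem.Set.len (PySem.Set.ofList (pvChars g)) := by
  simp [pvGroupCount, pvChars, PySem.Str.toList_join, pvJoin_empty_sep]

lemma pvChars_append_singleton (g : List String) (line : String) :
    pvChars (g ++ [line]) = pvChars g ++ line.toList := by
  simp [pvChars]

-- A's loop computes t + pvSpecF input s
lemma pvA_loop (input : List String) : ∀ (s : PySem.Set Char) (t : Int),
    ((input.foldl
        (fun (st : PySem.Set Char × Int) line =>
          if line == "" then (PySem.Set.empty, st.2 + PySem.Set.len st.1)
          else (line.toList.foldl PySem.Set.add st.1, st.2))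
        (s, t)).2 + PySem.Set.len (input.foldl
        (fun (st : PySem.Set Char × Int) line =>
          if line == "" then (PySem.Set.empty, st.2 + PySem.Set.len st.1)
          else (line.toList.foldl PySem.Set.add st.1, st.2))
        (s, t)).1) = t + pvSpecF input s := by
  induction input with
  | nil => intro s t; simp [pvSpecF]
  | cons line rest ih =>
    intro s t
    by_cases h : line = ""
    · simp only [List.foldl_cons, h, pvSpecF, BEq.rfl, if_pos]
      rw [ih]
      ring
    · have hb : (line == "") = false := by simp [h]
      simp only [List.foldl_cons, pvSpecF, hb, if_false, Bool.false_eq_true]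
      rw [ih]
      rfl

-- B's loop computes the done-groups' sum plus pvSpecF input (set of the current group's chars)
lemma pvB_loop (input : List String) : ∀ (done : List (List String)) (cur : List String),
    ((((input.foldl
        (fun (acc : List (List String) × List String) line =>
          if line == "" then (acc.1 ++ [acc.2], [])
          else (acc.1, acc.2 ++ [line]))
        (done, cur)).1 ++ [(input.foldl
        (fun (acc : List (List String) × List String) line =>
          if line == "" then (acc.1 ++ [acc.2], [])
          else (acc.1, acc.2 ++ [line]))
        (done, cur)).2]).map pvGroupCount).sum)
    = (done.map pvGroupCount).sum + pvSpecF input (PySem.Set.ofList (pvChars cur)) := by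
  induction input with
  | nil =>
    intro done cur
    simp [pvSpecF, pvGroupCount_eq]
  | cons line rest ih =>
    intro done cur
    by_cases h : line = ""
    · simp only [List.foldl_cons, h, pvSpecF, BEq.rfl, if_pos]
      rw [ih]
      have : pvChars ([] : List String) = [] := rfl
      rw [this]
      simp [pvGroupCount_eq, PySem.Set.empty]
      ring
    · have hb : (line == "") = false := by simp [h]
      simp only [List.foldl_cons, pvSpecF, hb, if_false, Bool.false_eq_true]
      rw [ih, pvChars_append_singleton, PySem.Set.ofList_append]

-- ===== VERDICT (by name: the statement is the Claim_ definition above) =====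
theorem part1_solution_spec : Claim_equal_part1_solution := by
  intro input _
  show part1_solution input = part1_solution_alt input
  have hA := pvA_loop input PySem.Set.empty 0
  have hB := pvB_loop input [] []
  unfold part1_solution part1_solution_alt pvGroups
  rw [hA, hB]
  have : pvChars ([] : List String) = [] := rfl
  rw [this]
  simp [PySem.Set.empty]
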